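-- pv_equiv track=rewrite | github.com/prakruthishekar/Competitive-Coding | Implementation of Linked List/Intersection.py | getMaxBarrier
-- ===== SOURCE A (Python) =====
-- def getMaxBarrier(initialEnergy, th):
--     low = 0
--     high = max(initialEnergy)
--
--     while low <= high:
--         midpoint = (low + high) // 2
--         total_energy = 0
--
--         for energy in initialEnergy:
--             final_energy = max(energy - midpoint, 0)
--             total_energy += final_energy
--
--         if total_energy >= th:
--             low = midpoint + 1
--         else:
--             high = midpoint - 1
--
--     return low - 1
-- ===== SOURCE B (Python) =====
-- def getMaxBarrier(initialEnergy, th):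
--     # Sort descending; on each segment of barriers with a fixed count of
--     # contributing elements the total energy is linear, so the best barrier
--     # of each segment is found by one integer division.
--     a = sorted(initialEnergy, reverse=True)
--     best = -1
--     P = 0
--     for k, x in enumerate(a):
--         P += x
--         hi = x - 1
--         lo = max(a[k + 1], 0) if k + 1 < len(a) else 0
--         if lo <= hi:
--             m = (P - th) // (k + 1)
--             if m >= lo:
--                 best = max(best, min(m, hi))
--     if th <= 0 and a[0] >= 0:
--         best = max(best, a[0])
--     return best
-- ===== Notes on version B (the rewrite author's own statement) =====
-- stated objective: faster
-- what changed: Replaces the binary search over the barrier (each step re-summing the whole list) by one descending sort with a running prefix sum: on each segment of barriers with a fixed count of contributing elements the total is linear, so the best barrier of each segment is found by one integer division.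
import Mathlib
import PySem

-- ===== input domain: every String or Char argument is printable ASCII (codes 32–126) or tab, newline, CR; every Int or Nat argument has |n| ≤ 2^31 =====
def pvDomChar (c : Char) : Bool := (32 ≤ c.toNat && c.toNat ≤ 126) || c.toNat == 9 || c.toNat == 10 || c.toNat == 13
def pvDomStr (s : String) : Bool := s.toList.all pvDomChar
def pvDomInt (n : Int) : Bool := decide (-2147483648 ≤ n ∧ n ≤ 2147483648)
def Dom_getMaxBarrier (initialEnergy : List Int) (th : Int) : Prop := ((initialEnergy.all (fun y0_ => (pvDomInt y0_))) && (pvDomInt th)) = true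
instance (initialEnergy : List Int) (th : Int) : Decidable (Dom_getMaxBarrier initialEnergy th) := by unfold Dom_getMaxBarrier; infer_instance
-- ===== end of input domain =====

-- B replaces A's binary search by one descending sort with prefix sums (per-segment linear solve); A = B proved on nonempty lists (A raises on []).

-- ===== PORT A =====
-- the while-loop of A: state (low, high); the Nat argument is pure fuel (the loop shrinks
-- high+1-low every iteration, so fuel (high+1-low).toNat makes fuel 0 coincide with low > high)
def getMaxBarrierLoop (initialEnergy : List Int) (th : Int) : Nat → Int → Int → Int
  | 0, lo, _hi => lo - 1
  | Nat.succ n, lo, hi =>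
    if lo ≤ hi then
      let midpoint := PySem.Int.floordiv (lo + hi) 2
      let total := initialEnergy.foldl (fun acc e => acc + max (e - midpoint) 0) 0
      if total ≥ th then getMaxBarrierLoop initialEnergy th n (midpoint + 1) hi
      else getMaxBarrierLoop initialEnergy th n lo (midpoint - 1)
    else lo - 1

-- max(initialEnergy) raises ValueError on []: Pre_ excludes []; .getD 0 is never reached inside Pre_
def getMaxBarrier (initialEnergy : List Int) (th : Int) : Int :=
  let high := (PySem.List.max? initialEnergy (fun x => x)).getD 0
  getMaxBarrierLoop initialEnergy th (high + 1).toNat 0 high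

-- ===== PORT B =====
-- lo of Source B's loop body: max(a[k+1], 0) if k+1 < len(a) else 0  (the remaining list's head)
def altLo : List Int → Int
  | [] => 0
  | y :: _ => max y 0

-- the for-loop of Source B: state (k, P, best)
def altLoop (th : Int) : List Int → Int → Int → Int → Int
  | [], _k, _P, best => best
  | x :: rest, k, P, best =>
    let P' := P + x
    let hi := x - 1
    let lo := altLo rest
    let best' :=
      if lo ≤ hi then
        let m := PySem.Int.floordiv (P' - th) (k + 1)
        if m ≥ lo then max best (min m hi) else best
      else best
    altLoop th rest (k + 1) P' best'

-- a[0] raises IndexError on [] (reached only when th ≤ 0): Pre_ excludes []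
def getMaxBarrier_alt (initialEnergy : List Int) (th : Int) : Int :=
  let a := PySem.List.sorted initialEnergy (fun x => x) true
  let best := altLoop th a 0 0 (-1)
  match a with
  | [] => best
  | x :: _ => if th ≤ 0 ∧ x ≥ 0 then max best x else best

-- ===== PRECONDITION & SPEC =====
-- A raises ValueError (max of empty list) on []: exactly the empty list is excluded
def Pre_getMaxBarrier (initialEnergy : List Int) (th : Int) : Prop := initialEnergy ≠ []
instance (initialEnergy : List Int) (th : Int) : Decidable (Pre_getMaxBarrier initialEnergy th) := by unfold Pre_getMaxBarrier; infer_instance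
def pvWitness_getMaxBarrier : List Int × Int := ([3, 1], 2)

def Spec_getMaxBarrier (initialEnergy : List Int) (th : Int) (out : Int) : Prop := out = getMaxBarrier_alt initialEnergy th
instance (initialEnergy : List Int) (th : Int) (out : Int) : Decidable (Spec_getMaxBarrier initialEnergy th out) := by unfold Spec_getMaxBarrier; infer_instance

-- ===== CLAIM (what is proved, stated in full; the proofs are below) =====
def Claim_equal_getMaxBarrier : Prop := ∀ (initialEnergy : List Int) (th : Int), Dom_getMaxBarrier initialEnergy th → Pre_getMaxBarrier initialEnergy th → Spec_getMaxBarrier initialEnergy th (getMaxBarrier initialEnergy th)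

-- ===== LEMMAS AND PROOFS =====

-- total energy kept at barrier m
def fE (l : List Int) (m : Int) : Int := (l.map (fun e => max (e - m) 0)).sum

theorem foldl_fE (l : List Int) (m c : Int) :
    l.foldl (fun acc e => acc + max (e - m) 0) c = c + fE l m := by
  induction l generalizing c with
  | nil => simp [fE]
  | cons x t ih =>
    simp only [List.foldl_cons]
    rw [ih]
    simp [fE]
    ring

theorem fE_antitone (l : List Int) {m m' : Int} (h : m ≤ m') : fE l m' ≤ fE l m := by
  unfold fE
  apply List.sum_le_sum
  intro e _
  exact max_le_max (by omega) (le_refl 0)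

theorem fE_all_le (l : List Int) (m : Int) (h : ∀ e ∈ l, e ≤ m) : fE l m = 0 := by
  induction l with
  | nil => simp [fE]
  | cons x t ih =>
    have hx := h x (by simp)
    have ht : fE t m = 0 := ih (fun e he => h e (by simp [he]))
    simp [fE, List.map_cons, List.sum_cons] at *
    omega

theorem fE_all_ge (l : List Int) (m : Int) (h : ∀ e ∈ l, m ≤ e) : fE l m = l.sum - l.length * m := by
  induction l with
  | nil => simp [fE]
  | cons x t ih =>
    have hx := h x (by simp)
    have ht : fE t m = t.sum - t.length * m := ih (fun e he => h e (by simp [he]))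
    simp [fE, List.map_cons, List.sum_cons] at *
    rw [ht]
    have : max (x - m) 0 = x - m := by omega
    rw [this]
    ring

-- on a segment: everything in pre ++ [x] is ≥ m, everything in rest is ≤ m
theorem fE_segment (pre rest : List Int) (x m : Int)
    (hpre : ∀ e ∈ pre, m ≤ e) (hx : m ≤ x) (hrest : ∀ e ∈ rest, e ≤ m) :
    fE (pre ++ x :: rest) m = (pre.sum + x) - ((pre.length : Int) + 1) * m := by
  have h1 : fE pre m = pre.sum - pre.length * m := fE_all_ge pre m hpre
  have h2 : fE rest m = 0 := fE_all_le rest m hrest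
  have h3 : fE (pre ++ x :: rest) m = fE pre m + (max (x - m) 0 + fE rest m) := by
    simp [fE]
  rw [h3, h1, h2]
  have h4 : max (x - m) 0 = x - m := by omega
  rw [h4]; ring

-- the "good result" characterisation shared by both programs (M = max of the list)
def GoodR (l : List Int) (th M r : Int) : Prop :=
  -1 ≤ r ∧ r ≤ M ∧ (r = -1 ∨ (0 ≤ r ∧ th ≤ fE l r)) ∧ (r = M ∨ fE l (r + 1) < th)

theorem GoodR_unique (l : List Int) (th M r₁ r₂ : Int)
    (h₁ : GoodR l th M r₁) (h₂ : GoodR l th M r₂) : r₁ = r₂ := by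
  obtain ⟨a₁, b₁, c₁, d₁⟩ := h₁
  obtain ⟨a₂, b₂, c₂, d₂⟩ := h₂
  by_contra hne
  rcases lt_or_gt_of_ne hne with hlt | hlt
  · rcases c₂ with rfl | ⟨hp, hf⟩
    · omega
    · rcases d₁ with rfl | hlt₁
      · omega
      · have := fE_antitone l (show r₁ + 1 ≤ r₂ by omega)
        omega
  · rcases c₁ with rfl | ⟨hp, hf⟩
    · omega
    · rcases d₂ with rfl | hlt₂
      · omega
      · have := fE_antitone l (show r₂ + 1 ≤ r₁ by omega)
        omega

-- binary-search loop exit: enough fuel means fuel 0 only at lo = hi + 1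
theorem bs_base (l : List Int) (th M lo hi : Int) (hlohi : lo = hi + 1) (h0 : 0 ≤ lo)
    (hM : hi ≤ M) (hlo : lo = 0 ∨ th ≤ fE l (lo - 1)) (hhi : hi = M ∨ fE l (hi + 1) < th) :
    GoodR l th M (lo - 1) := by
  refine ⟨by omega, by omega, ?_, ?_⟩
  · by_cases hlo0 : lo = 0
    · exact Or.inl (by omega)
    · rcases hlo with rfl | hf
      · exact absurd rfl hlo0
      · exact Or.inr ⟨by omega, hf⟩
  · rcases hhi with rfl | hf
    · exact Or.inl (by omega)
    · refine Or.inr ?_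
      rw [show lo - 1 + 1 = lo by ring, hlohi]
      exact hf

-- binary-search invariant: with sufficient fuel the loop result is the Good value
theorem bs_good (l : List Int) (th M : Int) :
    ∀ n : Nat, ∀ lo hi : Int, (hi + 1 - lo).toNat ≤ n → 0 ≤ lo → lo ≤ hi + 1 → hi ≤ M →
    (lo = 0 ∨ th ≤ fE l (lo - 1)) → (hi = M ∨ fE l (hi + 1) < th) →
    GoodR l th M (getMaxBarrierLoop l th n lo hi) := by
  intro n
  induction n with
  | zero =>
    intro lo hi hn h0 hle hM hlo hhi
    exact bs_base l th M lo hi (by omega) h0 hM hlo hhi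
  | succ n ih =>
    intro lo hi hn h0 hle hM hlo hhi
    show GoodR l th M (if lo ≤ hi then
        (if List.foldl (fun acc e => acc + max (e - PySem.Int.floordiv (lo + hi) 2) 0) 0 l ≥ th
          then getMaxBarrierLoop l th n (PySem.Int.floordiv (lo + hi) 2 + 1) hi
          else getMaxBarrierLoop l th n lo (PySem.Int.floordiv (lo + hi) 2 - 1))
      else lo - 1)
    by_cases h : lo ≤ hi
    · rw [if_pos h]
      have hmid : lo ≤ PySem.Int.floordiv (lo + hi) 2 ∧ PySem.Int.floordiv (lo + hi) 2 ≤ hi :=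
        PySem.Int.floordiv_two_mid_bounds h
      rw [foldl_fE, zero_add]
      set mid := PySem.Int.floordiv (lo + hi) 2 with hmiddef
      split_ifs with hc
      · refine ih (mid + 1) hi (by omega) (by omega) (by omega) hM (Or.inr ?_) hhi
        rw [show mid + 1 - 1 = mid by ring]
        exact hc
      · refine ih lo (mid - 1) (by omega) h0 (by omega) (by omega) hlo (Or.inr ?_)
        rw [show mid - 1 + 1 = mid by ring]
        omega
    · rw [if_neg h]
      exact bs_base l th M lo hi (by omega) h0 hM hlo hhi

theorem altLo_nonneg (rest : List Int) : 0 ≤ altLo rest := by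
  cases rest with
  | nil => exact le_refl 0
  | cons y t => exact le_max_right y 0

theorem altLo_ge (rest : List Int) (e : Int) (he : e ∈ rest)
    (hsort : rest.Pairwise (fun p q => q ≤ p)) : e ≤ altLo rest := by
  cases rest with
  | nil => simp at he
  | cons y t =>
    rcases List.mem_cons.mp he with rfl | he'
    · exact le_max_left e 0
    · exact le_trans ((List.pairwise_cons.mp hsort).1 e he') (le_max_left y 0)

theorem altLo_nil : altLo [] = 0 := rfl
theorem altLo_cons (y : Int) (t : List Int) : altLo (y :: t) = max y 0 := rfl

theorem altLoop_nil (th k P best : Int) : altLoop th [] k P best = best := rfl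

theorem altLoop_cons (th x : Int) (rest : List Int) (k P best : Int) :
    altLoop th (x :: rest) k P best =
      altLoop th rest (k + 1) (P + x)
        (if altLo rest ≤ x - 1 then
          (if PySem.Int.floordiv (P + x - th) (k + 1) ≥ altLo rest then
            max best (min (PySem.Int.floordiv (P + x - th) (k + 1)) (x - 1)) else best)
        else best) := rfl

-- altLoop never decreases best
theorem altLoop_ge (th : Int) (rest : List Int) :
    ∀ k P best : Int, best ≤ altLoop th rest k P best := by
  induction rest with
  | nil => intro k P best; rw [altLoop_nil]
  | cons x t ih =>
    intro k P best
    rw [altLoop_cons]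
    split_ifs with h1 h2
    · exact le_trans (le_max_left _ _) (ih _ _ _)
    · exact ih _ _ _
    · exact ih _ _ _

-- if every remaining element is ≤ 0, no segment is feasible and best passes through
theorem altLoop_nonpos (th : Int) (rest : List Int) (hneg : ∀ e ∈ rest, e ≤ 0) :
    ∀ k P best : Int, altLoop th rest k P best = best := by
  induction rest with
  | nil => intro k P best; rw [altLoop_nil]
  | cons x t ih =>
    intro k P best
    have hx := hneg x (by simp)
    have hlo := altLo_nonneg t
    rw [altLoop_cons]
    split_ifs with h1 h2
    · exact absurd h1 (by omega)
    · exact absurd h1 (by omega)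
    · exact ih (fun e he => hneg e (by simp [he])) _ _ _

def SoundB (a : List Int) (th M b : Int) : Prop :=
  b = -1 ∨ (0 ≤ b ∧ b ≤ M ∧ th ≤ fE a b)

theorem altLoop_sound (a : List Int) (th M : Int) (hM : ∀ e ∈ a, e ≤ M)
    (hsort : a.Pairwise (fun p q => q ≤ p)) :
    ∀ (rest pre : List Int) (best : Int), a = pre ++ rest →
    SoundB a th M best →
    SoundB a th M (altLoop th rest (pre.length : Int) pre.sum best) := by
  intro rest
  induction rest with
  | nil => intro pre best ha hs; rw [altLoop_nil]; exact hs
  | cons x t ih =>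
    intro pre best ha hs
    rw [altLoop_cons]
    have hbest' : SoundB a th M (if altLo t ≤ x - 1 then
        (if PySem.Int.floordiv (pre.sum + x - th) ((pre.length : Int) + 1) ≥ altLo t then
          max best (min (PySem.Int.floordiv (pre.sum + x - th) ((pre.length : Int) + 1)) (x - 1))
        else best) else best) := by
      split_ifs with h1 h2
      · -- a candidate was produced: show it is sound, then so is the max
        set cand := min (PySem.Int.floordiv (pre.sum + x - th) ((pre.length : Int) + 1)) (x - 1) with hcand
        have hlo := altLo_nonneg t
        have hxa : x ∈ a := by rw [ha]; simp
        have hxM : x ≤ M := hM x hxa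
        have hpw := (List.pairwise_append.mp (ha ▸ hsort))
        have hpre_ge : ∀ e ∈ pre, x ≤ e := fun e he => hpw.2.2 e he x (by simp)
        have htle : ∀ e ∈ t, e ≤ altLo t := fun e he =>
          altLo_ge t e he (List.pairwise_cons.mp hpw.2.1).2
        have hcand_lo : altLo t ≤ cand := by
          rw [hcand]; exact le_min h2 h1
        have hcand_x : cand ≤ x - 1 := min_le_right _ _
        have hfE : fE a cand = (pre.sum + x) - ((pre.length : Int) + 1) * cand := by
          rw [ha]
          exact fE_segment pre t x cand
            (fun e he => by have := hpre_ge e he; omega)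
            (by omega)
            (fun e he => le_trans (htle e he) hcand_lo)
        have hdiv : cand * ((pre.length : Int) + 1) ≤ pre.sum + x - th := by
          have hpos : (0:Int) < (pre.length : Int) + 1 := by positivity
          exact (PySem.Int.le_floordiv_iff_mul_le hpos).mp (min_le_left _ _)
        have hcand_sound : SoundB a th M cand := by
          refine Or.inr ⟨by omega, by omega, ?_⟩
          rw [hfE]
          nlinarith [hdiv]
        rcases le_total best cand with hbc | hbc
        · rw [max_eq_right hbc]; exact hcand_sound
        · rw [max_eq_left hbc]; exact hs
      · exact hs
      · exact hs
    have hgoal := ih (pre ++ [x]) _ (by simp [ha]) hbest'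
    simp only [List.length_append, List.length_cons, List.length_nil, Nat.cast_add, Nat.cast_one,
      List.sum_append, List.sum_cons, List.sum_nil, add_zero] at hgoal
    exact hgoal

theorem altLoop_complete (a : List Int) (th : Int)
    (hsort : a.Pairwise (fun p q => q ≤ p)) :
    ∀ (t : List Int) (pre : List Int) (x best m : Int), a = pre ++ x :: t →
    0 ≤ m → m < x → th ≤ fE a m →
    m ≤ altLoop th (x :: t) (pre.length : Int) pre.sum best := by
  intro t
  induction t with
  | nil =>
    intro pre x best m ha h0 hmx hfe
    rw [altLoop_cons, altLo_nil]
    have hpw := (List.pairwise_append.mp (ha ▸ hsort))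
    have hpre_ge : ∀ e ∈ pre, x ≤ e := fun e he => hpw.2.2 e he x (by simp)
    have hfE : fE a m = (pre.sum + x) - ((pre.length : Int) + 1) * m := by
      rw [ha]
      exact fE_segment pre [] x m
        (fun e he => by have := hpre_ge e he; omega) (by omega) (by simp)
    have hpos : (0:Int) < (pre.length : Int) + 1 := by positivity
    have hmdiv : m ≤ PySem.Int.floordiv (pre.sum + x - th) ((pre.length : Int) + 1) := by
      apply (PySem.Int.le_floordiv_iff_mul_le hpos).mpr
      nlinarith [hfe, hfE]
    rw [if_pos (by omega), if_pos (by omega), altLoop_nil]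
    omega
  | cons y t' ih =>
    intro pre x best m ha h0 hmx hfe
    by_cases hmy : m < y
    · -- covered deeper in the list: recurse
      rw [altLoop_cons]
      have hk : ((pre.length : Int) + 1) = (((pre ++ [x]).length : Int)) := by simp
      have hP : pre.sum + x = (pre ++ [x]).sum := by simp
      rw [hk, hP]
      exact ih (pre ++ [x]) y _ m (by simp [ha]) h0 hmy hfe
    · -- this is m's segment
      push_neg at hmy
      rw [altLoop_cons, altLo_cons]
      have hpw := (List.pairwise_append.mp (ha ▸ hsort))
      have hpre_ge : ∀ e ∈ pre, x ≤ e := fun e he => hpw.2.2 e he x (by simp)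
      have hpw3 := List.pairwise_cons.mp (List.pairwise_cons.mp hpw.2.1).2
      have hty : ∀ e ∈ y :: t', e ≤ y := by
        intro e he
        rcases List.mem_cons.mp he with rfl | he'
        · exact le_refl e
        · exact hpw3.1 e he' 
      have hfE : fE a m = (pre.sum + x) - ((pre.length : Int) + 1) * m := by
        rw [ha]
        exact fE_segment pre (y :: t') x m
          (fun e he => by have := hpre_ge e he; omega) (by omega)
          (fun e he => le_trans (hty e he) hmy)
      have hpos : (0:Int) < (pre.length : Int) + 1 := by positivity
      have hmdiv : m ≤ PySem.Int.floordiv (pre.sum + x - th) ((pre.length : Int) + 1) := by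
        apply (PySem.Int.le_floordiv_iff_mul_le hpos).mpr
        nlinarith [hfe, hfE]
      have hlom : max y 0 ≤ m := by omega
      rw [if_pos (by omega), if_pos (by omega)]
      calc m ≤ max best (min (PySem.Int.floordiv (pre.sum + x - th) ((pre.length : Int) + 1)) (x - 1)) := by
                exact le_trans (le_min hmdiv (by omega)) (le_max_right _ _)
        _ ≤ _ := altLoop_ge th (y :: t') _ _ _

-- B's value satisfies GoodR when max ≥ 0, and is -1 when max < 0
theorem alt_good (l : List Int) (th : Int) (hne : l ≠ []) (M : Int)
    (hMmem : M ∈ l) (hMmax : ∀ e ∈ l, e ≤ M) :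
    (M < 0 → getMaxBarrier_alt l th = -1) ∧ (0 ≤ M → GoodR l th M (getMaxBarrier_alt l th)) := by
  have hperm := PySem.List.sorted_perm l (fun x => x) true
  have hsort : (PySem.List.sorted l (fun x => x) true).Pairwise (fun p q => q ≤ p) :=
    PySem.List.sorted_pairwise_rev l (fun x => x)
  obtain ⟨x, t, ha⟩ : ∃ x t, PySem.List.sorted l (fun x => x) true = x :: t := by
    rcases hh : PySem.List.sorted l (fun x => x) true with _ | ⟨x, t⟩
    · exact absurd ((PySem.List.sorted_eq_nil_iff l (fun x => x) true).mp hh) hne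
    · exact ⟨x, t, rfl⟩
  have hmem_a : ∀ e, e ∈ PySem.List.sorted l (fun x => x) true ↔ e ∈ l := fun e => hperm.mem_iff
  have hxM : x = M := by
    have h1 : x ≤ M := hMmax x ((hmem_a x).mp (by rw [ha]; simp))
    have h2 : M ≤ x := PySem.List.key_head_sorted_rev_ge l (fun x => x) ha M hMmem
    omega
  have hfeq : ∀ m, fE (PySem.List.sorted l (fun x => x) true) m = fE l m := by
    intro m
    exact (hperm.map (fun e => max (e - m) 0)).sum_eq
  have hb := altLoop_ge th (PySem.List.sorted l (fun x => x) true) 0 0 (-1)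
  constructor
  · intro hMneg
    have hnp : altLoop th (PySem.List.sorted l (fun x => x) true) 0 0 (-1) = -1 :=
      altLoop_nonpos th _ (fun e he => by have := hMmax e ((hmem_a e).mp he); omega) 0 0 (-1)
    simp only [getMaxBarrier_alt]
    rw [ha] at hnp ⊢
    rw [hnp]
    show (if th ≤ 0 ∧ x ≥ 0 then max (-1) x else (-1 : Int)) = -1
    rw [if_neg (by omega)]
  · intro hMpos
    have hsound : SoundB (PySem.List.sorted l (fun x => x) true) th M
        (altLoop th (PySem.List.sorted l (fun x => x) true) 0 0 (-1)) := by
      have := altLoop_sound (PySem.List.sorted l (fun x => x) true) th M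
        (fun e he => hMmax e ((hmem_a e).mp he)) hsort
        (PySem.List.sorted l (fun x => x) true) [] (-1) (by simp) (Or.inl rfl)
      simpa using this
    set b := altLoop th (PySem.List.sorted l (fun x => x) true) 0 0 (-1) with hbdef
    have hbM : b ≤ M := by rcases hsound with h | ⟨_, h, _⟩ <;> omega
    have hcomp : ∀ m, 0 ≤ m → m < x → th ≤ fE l (m) → m ≤ b := by
      intro m h0 hmx hfe
      have := altLoop_complete (PySem.List.sorted l (fun x => x) true) th hsort
        t [] x (-1) m (by simp [ha]) h0 hmx (by rw [hfeq]; exact hfe)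
      simpa [← ha] using this
    have hfex : fE l x = 0 := by
      rw [← hfeq]
      exact fE_all_le _ x (fun e he => by have := hMmax e ((hmem_a e).mp he); omega)
    have hres : getMaxBarrier_alt l th =
        (if th ≤ 0 ∧ x ≥ 0 then max b x else b) := by
      simp only [getMaxBarrier_alt]
      rw [ha]
      show (if th ≤ 0 ∧ x ≥ 0 then max (altLoop th (x :: t) 0 0 (-1)) x
        else altLoop th (x :: t) 0 0 (-1)) = _
      rw [hbdef, ha]
    rw [hres]
    split_ifs with hsp
    · -- special case fired: best = max b x
      rcases le_total b x with hbx | hbx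
      · rw [max_eq_right hbx]
        refine ⟨by omega, by omega, Or.inr ⟨by omega, by rw [hfex]; exact hsp.1⟩, Or.inl hxM⟩
      · rw [max_eq_left hbx]
        have hb0 : 0 ≤ b := le_trans hsp.2 hbx
        rcases hsound with hbneg | ⟨_, _, hfeb⟩
        · omega
        · exact ⟨by omega, hbM, Or.inr ⟨hb0, by rw [← hfeq]; exact hfeb⟩, Or.inl (by omega)⟩
    · refine ⟨by omega, hbM, ?_, ?_⟩
      · rcases hsound with hbneg | ⟨h0, _, hfeb⟩
        · exact Or.inl hbneg
        · exact Or.inr ⟨h0, by rw [← hfeq]; exact hfeb⟩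
      · by_cases hbMeq : b = M
        · exact Or.inl hbMeq
        · refine Or.inr ?_
          by_contra hge
          push_neg at hge
          have h0b : 0 ≤ b + 1 := by omega
          have hbx : b + 1 < x ∨ b + 1 = x := by omega
          rcases hbx with hlt | heq
          · have := hcomp (b + 1) h0b hlt hge
            omega
          · rw [heq, hfex] at hge
            exact hsp ⟨by omega, by omega⟩

-- ===== VERDICT (by name: the statement is the Claim_ definition above) =====
theorem getMaxBarrier_spec : Claim_equal_getMaxBarrier := by
  intro l th _hdom hpre
  unfold Spec_getMaxBarrier
  have hne : l ≠ [] := hpre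
  obtain ⟨M0, hM0⟩ : ∃ m, PySem.List.max? l (fun x => x) = some m := by
    rcases hh : PySem.List.max? l (fun x => x) with _ | m
    · exact absurd ((PySem.List.max?_eq_none_iff l (fun x => x)).mp hh) hne
    · exact ⟨m, rfl⟩
  have hMmem : M0 ∈ l := PySem.List.max?_mem hM0
  have hMmax : ∀ e ∈ l, e ≤ M0 := PySem.List.max?_isMax hM0
  have hA : getMaxBarrier l th = getMaxBarrierLoop l th (M0 + 1).toNat 0 M0 := by
    simp only [getMaxBarrier]
    rw [hM0]
    rfl
  obtain ⟨hneg, hpos⟩ := alt_good l th hne M0 hMmem hMmax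
  by_cases hM : 0 ≤ M0
  · have hAgood : GoodR l th M0 (getMaxBarrier l th) := by
      rw [hA]
      exact bs_good l th M0 (M0 + 1).toNat 0 M0 (by omega) (le_refl 0) (by omega) (le_refl M0)
        (Or.inl rfl) (Or.inl rfl)
    exact GoodR_unique l th M0 _ _ hAgood (hpos hM)
  · push_neg at hM
    have hfuel : (M0 + 1).toNat = 0 := by omega
    rw [hA, hfuel, hneg hM]
    show (0:Int) - 1 = -1
    norm_num
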